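-- pv_equiv track=rewrite | github.com/AndrewRobinson324/Chess-Review | src/pgn/pgn.py | convert_movelist_to_pgn
-- ===== SOURCE A (Python) =====
-- def convert_movelist_to_pgn(moves):
--     pgn = ""
--     move_number = 1
--
--     for move in moves:
--         if move_number % 2 == 1:
--             pgn += f"{move_number // 2 + 1}.{move} "
--         else:
--             pgn += f"{move} "
--         move_number += 1
--
--     return pgn.strip()
-- ===== SOURCE B (Python) =====
-- def convert_movelist_to_pgn(moves):
--     whites = moves[0::2]
--     blacks = moves[1::2]
--     parts = [f"{n}.{w} {b}" for n, (w, b) in enumerate(zip(whites, blacks), 1)]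
--     if len(moves) % 2 == 1:
--         parts.append(f"{len(moves) // 2 + 1}.{moves[-1]}")
--     return " ".join(parts).strip()
-- ===== Notes on version B (the rewrite author's own statement) =====
-- stated objective: alternative
-- what changed: B replaces A's single pass with a parity counter by slicing the list into white (moves[0::2]) and black (moves[1::2]) half-moves, zipping them into numbered pair tokens (plus a trailing lone white-move token for odd length) and joining with spaces.
import Mathlib
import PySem

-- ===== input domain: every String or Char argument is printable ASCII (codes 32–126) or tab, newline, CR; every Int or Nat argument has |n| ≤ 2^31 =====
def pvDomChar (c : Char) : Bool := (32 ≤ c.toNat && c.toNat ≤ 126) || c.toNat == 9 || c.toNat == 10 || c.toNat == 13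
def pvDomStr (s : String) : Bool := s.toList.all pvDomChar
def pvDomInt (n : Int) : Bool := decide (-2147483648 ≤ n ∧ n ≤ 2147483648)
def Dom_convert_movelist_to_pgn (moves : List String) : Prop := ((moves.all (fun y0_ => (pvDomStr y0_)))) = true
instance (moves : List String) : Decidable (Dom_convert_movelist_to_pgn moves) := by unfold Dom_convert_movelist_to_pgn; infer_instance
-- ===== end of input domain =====

-- B formats the move list by pairing the white/black half-move slices (moves[0::2] with moves[1::2])
-- and joining numbered pair tokens, instead of A's one-pass parity counter; objective: alternative.

-- ===== PORT A =====
def convert_movelist_to_pgn (moves : List String) : String :=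
  let r := moves.foldl
    (fun (st : String × Int) move =>
      if PySem.Int.mod st.2 2 == 1 then
        (st.1 ++ PySem.Int.toStr (PySem.Int.floordiv st.2 2 + 1) ++ "." ++ move ++ " ", st.2 + 1)
      else
        (st.1 ++ move ++ " ", st.2 + 1))
    ("", 1)
  PySem.Str.strip r.1

-- ===== PORT B =====
def convert_movelist_to_pgn_alt (moves : List String) : String :=
  let whites := (PySem.List.slice? moves (some 0) none 2).getD []  -- step 2 ≠ 0: slice? is always some
  let blacks := (PySem.List.slice? moves (some 1) none 2).getD []
  let parts := (PySem.List.enumerate (whites.zip blacks) 1).map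
    (fun nwb => PySem.Int.toStr nwb.1 ++ "." ++ nwb.2.1 ++ " " ++ nwb.2.2)
  let parts2 :=
    if PySem.Int.mod (moves.length : Int) 2 == 1 then
      -- moves[-1]: the odd-length guard means moves ≠ [], so the index is in range
      parts ++ [PySem.Int.toStr (PySem.Int.floordiv (moves.length : Int) 2 + 1) ++ "." ++
                 (PySem.List.pyGet? moves (-1)).getD ""]
    else parts
  PySem.Str.strip (PySem.Str.join " " parts2)

-- ===== PRECONDITION & SPEC =====
def Spec_convert_movelist_to_pgn (moves : List String) (out : String) : Prop := out = convert_movelist_to_pgn_alt moves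
instance (moves : List String) (out : String) : Decidable (Spec_convert_movelist_to_pgn moves out) := by unfold Spec_convert_movelist_to_pgn; infer_instance

-- ===== CLAIM (what is proved, stated in full; the proofs are below) =====
def Claim_equal_convert_movelist_to_pgn : Prop := ∀ (moves : List String), Dom_convert_movelist_to_pgn moves → Spec_convert_movelist_to_pgn moves (convert_movelist_to_pgn moves)

-- ===== LEMMAS AND PROOFS =====

-- every second element of a list, starting at the head (= xs[0::2])
def pvEvens {α : Type} : List α → List α
  | [] => []
  | [a] => [a]
  | a :: _ :: r => a :: pvEvens r

-- A's accumulated text from a tail of the move list, starting at full-move number k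
def pvBodyA (k : Int) : List String → String
  | [] => ""
  | [w] => PySem.Int.toStr k ++ "." ++ w ++ " "
  | w :: b :: r => PySem.Int.toStr k ++ "." ++ w ++ " " ++ b ++ " " ++ pvBodyA (k + 1) r

-- B's token list from a tail of the move list, starting at full-move number k
def pvBodyB (k : Int) : List String → List String
  | [] => []
  | [w] => [PySem.Int.toStr k ++ "." ++ w]
  | w :: b :: r => (PySem.Int.toStr k ++ "." ++ w ++ " " ++ b) :: pvBodyB (k + 1) r

-- B's zip-generated pair tokens only (no trailing lone white move)
def pvPairs (k : Int) : List String → List String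
  | w :: b :: r => (PySem.Int.toStr k ++ "." ++ w ++ " " ++ b) :: pvPairs (k + 1) r
  | _ => []

lemma pvFilt2 {α : Type} (xs : List α) :
    List.filterMap (fun (k : Nat) => xs[((2:Int) * (k:Int)).toNat]?) (List.range ((xs.length + 1) / 2)) = pvEvens xs := by
  fun_induction pvEvens xs with
  | case1 => simp
  | case2 a => simp
  | case3 a b r ih =>
    have h : ((a :: b :: r).length + 1) / 2 = (r.length + 1) / 2 + 1 := by simp; omega
    rw [h, List.range_succ_eq_map, List.filterMap_cons, List.filterMap_map]
    show _ = a :: pvEvens r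
    norm_num
    rw [← ih]
    apply List.filterMap_congr
    intro k _
    have : ((2:Int) * ((k:Nat) + 1 : Int)).toNat = ((2:Int) * (k:Int)).toNat + 1 + 1 := by omega
    simp [this]

lemma pvSlice2_zero {α : Type} (xs : List α) : PySem.List.slice? xs (some 0) none 2 = some (pvEvens xs) := by
  simp only [PySem.List.slice?, PySem.List.sliceIndices]
  norm_num
  have h : (if 0 < xs.length then (((xs.length : Int) + 2 - 1) / 2).toNat else 0) = (xs.length + 1) / 2 := by
    split_ifs with h0 <;> omega
  rw [h, pvFilt2]

lemma pvSlice2_one {α : Type} (xs : List α) : PySem.List.slice? xs (some 1) none 2 = some (pvEvens xs.tail) := by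
  cases xs with
  | nil => simp [PySem.List.slice?, PySem.List.sliceIndices, pvEvens]
  | cons x t =>
    simp only [PySem.List.slice?, PySem.List.sliceIndices]
    norm_num
    have h : (if 0 < t.length then (((t.length : Int) + 2 - 1) / 2).toNat else 0) = (t.length + 1) / 2 := by
      split_ifs with h0 <;> omega
    rw [h, ← pvFilt2 t]
    apply List.filterMap_congr
    intro k _
    have hk : ((1:Int) + 2 * (k:Int)).toNat = ((2:Int) * (k:Int)).toNat + 1 := by omega
    simp [hk]

lemma pvEvens_cons {α : Type} (b : α) (r : List α) : pvEvens (b :: r) = b :: pvEvens r.tail := by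
  cases r <;> simp [pvEvens]

-- the zip-comprehension of B produces exactly the pair tokens
lemma pvEnumZip (r : List String) (k : Int) :
    (PySem.List.enumerate ((pvEvens r).zip (pvEvens r.tail)) k).map
      (fun nwb => PySem.Int.toStr nwb.1 ++ "." ++ nwb.2.1 ++ " " ++ nwb.2.2) = pvPairs k r := by
  induction r using pvEvens.induct generalizing k with
  | case1 => simp [pvEvens, pvPairs, PySem.List.enumerate]
  | case2 a => simp [pvEvens, pvPairs, PySem.List.enumerate]
  | case3 a b r ih =>
    show (PySem.List.enumerate ((pvEvens (a :: b :: r)).zip (pvEvens (b :: r))) k).map _ = _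
    rw [show pvEvens (a :: b :: r) = a :: pvEvens r from rfl, pvEvens_cons]
    rw [List.zip_cons_cons, PySem.List.enumerate_cons, List.map_cons, ih]
    rfl

-- appending the lone-white-move token (if any) completes the pair tokens to pvBodyB
lemma pvPairsComplete (r : List String) (k : Int) :
    pvPairs k r ++
      (if r.length % 2 = 1 then
        [PySem.Int.toStr (k + (r.length / 2 : Nat)) ++ "." ++ (PySem.List.pyGet? r (-1)).getD ""]
      else []) = pvBodyB k r := by
  induction r using pvEvens.induct generalizing k with
  | case1 => simp [pvPairs, pvBodyB]
  | case2 a => simp [pvPairs, pvBodyB, PySem.List.pyGet?, PySem.List.pyIdx?]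
  | case3 a b r ih =>
    show (_ :: pvPairs (k+1) r) ++ _ = (_ :: pvBodyB (k+1) r)
    rw [List.cons_append]
    congr 1
    rw [← ih (k+1)]
    congr 1
    have hlen : (a :: b :: r).length = r.length + 2 := by simp
    rw [hlen]
    have hmod : (r.length + 2) % 2 = r.length % 2 := by omega
    rw [hmod]
    split_ifs with hodd
    · have hr : r ≠ [] := by intro h; subst h; simp at hodd
      have hdiv : (((r.length + 2) / 2 : Nat) : Int) = ((r.length / 2 : Nat) : Int) + 1 := by
        push_cast [Nat.add_div_right]; ring
      rw [hdiv]
      have hget : PySem.List.pyGet? (a :: b :: r) (-1) = PySem.List.pyGet? r (-1) := by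
        cases r with
        | nil => simp at hr
        | cons c t =>
          simp [PySem.List.pyGet?, PySem.List.pyIdx?]
          rw [if_pos (by omega : (-1:Int) ≤ 1 + (t.length : Int))]
          simp only [Option.bind_some]
          simp [List.getElem?_cons_succ, List.getElem?_eq_getElem]
          rfl
      rw [hget]
      have : k + (((r.length / 2 : Nat) : Int) + 1) = k + 1 + ((r.length / 2 : Nat) : Int) := by ring
      rw [this]
    · rfl

-- A's fold, started at an odd counter 2k+1, appends pvBodyA (k+1) of the remaining moves
lemma pvALoop (moves : List String) (k : Int) (p : String) (n : Int) (hn : n = 2 * k + 1) :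
    (moves.foldl
      (fun (st : String × Int) move =>
        if PySem.Int.mod st.2 2 == 1 then
          (st.1 ++ PySem.Int.toStr (PySem.Int.floordiv st.2 2 + 1) ++ "." ++ move ++ " ", st.2 + 1)
        else
          (st.1 ++ move ++ " ", st.2 + 1))
      (p, n)).1 = p ++ pvBodyA (k + 1) moves := by
  subst hn
  induction moves using pvEvens.induct generalizing k p with
  | case1 => simp [pvBodyA]
  | case2 a =>
    have hm : PySem.Int.mod (2*k+1) 2 = 1 := by rw [PySem.Int.mod_eq_emod_of_pos (by omega)]; omega
    have hd : PySem.Int.floordiv (2*k+1) 2 = k := by rw [PySem.Int.floordiv_eq_ediv_of_pos (by omega)]; omega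
    have hd' : (2*k+1)/2 = k := by omega
    simp [hm, hd', pvBodyA, String.append_assoc]
  | case3 a b r ih =>
    have hm : PySem.Int.mod (2*k+1) 2 = 1 := by rw [PySem.Int.mod_eq_emod_of_pos (by omega)]; omega
    have hd : PySem.Int.floordiv (2*k+1) 2 = k := by rw [PySem.Int.floordiv_eq_ediv_of_pos (by omega)]; omega
    have hm2 : PySem.Int.mod (2*k+1+1) 2 = 0 := by rw [PySem.Int.mod_eq_emod_of_pos (by omega)]; omega
    rw [List.foldl_cons, List.foldl_cons]
    simp only [hm, hd, hm2, beq_self_eq_true, if_true]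
    rw [if_neg (by decide)]
    have h3 : 2*k+1+1+1 = 2*(k+1)+1 := by ring
    rw [h3, ih]
    simp [pvBodyA, String.append_assoc]

lemma pvStripAppendSpace (cs : List Char) : PySem.Chars.strip (cs ++ [' ']) = PySem.Chars.strip cs := by
  simp only [PySem.Chars.strip, PySem.Chars.lstrip, PySem.Chars.rstrip]
  rw [List.dropWhile_append]
  by_cases h : (List.dropWhile PySem.Chars.isspace cs).isEmpty
  · rw [if_pos h]
    rw [List.isEmpty_iff] at h
    rw [h]
    simp [show PySem.Chars.isspace ' ' = true from rfl]
  · rw [if_neg h]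
    rw [List.reverse_append]
    simp [show PySem.Chars.isspace ' ' = true from rfl]

lemma pvBodyB_ne_nil (k : Int) (r : List String) (h : r ≠ []) : pvBodyB k r ≠ [] := by
  cases r with
  | nil => simp at h
  | cons a t => cases t <;> simp [pvBodyB]

lemma pvJoinCons (a : List Char) (rest : List (List Char)) (h : rest ≠ []) :
    PySem.Chars.join [' '] (a :: rest) = a ++ [' '] ++ PySem.Chars.join [' '] rest := by
  simp [PySem.Chars.join]
  cases rest with
  | nil => simp at h
  | cons c cs => simp [List.intercalate, List.intersperse]

-- the pre-strip text of A is B's tokens joined by spaces, plus one trailing space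
lemma pvBodyAB (r : List String) (k : Int) (h : r ≠ []) :
    (pvBodyA k r).toList = PySem.Chars.join [' '] ((pvBodyB k r).map String.toList) ++ [' '] := by
  induction r using pvEvens.induct generalizing k with
  | case1 => simp at h
  | case2 a =>
    show (PySem.Int.toStr k ++ "." ++ a ++ " ").toList = _
    simp [pvBodyB, PySem.Chars.join, List.intercalate,
      show (" " : String).toList = [' '] from rfl]
  | case3 a b r ih =>
    show (PySem.Int.toStr k ++ "." ++ a ++ " " ++ b ++ " " ++ pvBodyA (k+1) r).toList = _
    by_cases hr : r = []
    · subst hr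
      simp [pvBodyA, pvBodyB, PySem.Chars.join, List.intercalate,
        show (" " : String).toList = [' '] from rfl]
    · show _ = PySem.Chars.join [' '] (((PySem.Int.toStr k ++ "." ++ a ++ " " ++ b) :: pvBodyB (k+1) r).map String.toList) ++ [' ']
      rw [List.map_cons,
        pvJoinCons _ _ (by simp [pvBodyB_ne_nil (k+1) r hr])]
      simp [String.toList_append, ih (k+1) hr, show (" " : String).toList = [' '] from rfl]

-- ===== VERDICT (by name: the statement is the Claim_ definition above) =====
theorem convert_movelist_to_pgn_spec : Claim_equal_convert_movelist_to_pgn := by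
  intro moves _
  unfold Spec_convert_movelist_to_pgn convert_movelist_to_pgn convert_movelist_to_pgn_alt
  rw [pvSlice2_zero, pvSlice2_one]
  simp only [Option.getD_some]
  rw [pvEnumZip]
  have hmod : PySem.Int.mod (moves.length : Int) 2 = ((moves.length % 2 : Nat) : Int) := by
    rw [PySem.Int.mod_eq_emod_of_pos (by omega)]; omega
  have hdiv : PySem.Int.floordiv (moves.length : Int) 2 = ((moves.length / 2 : Nat) : Int) := by
    rw [PySem.Int.floordiv_eq_ediv_of_pos (by omega)]; omega
  rw [hmod, hdiv]
  rw [pvALoop moves 0 "" 1 (by ring)]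
  have hif : (if ((((moves.length % 2 : Nat) : Int)) == 1) = true then
      pvPairs 1 moves ++ [PySem.Int.toStr (((moves.length / 2 : Nat) : Int) + 1) ++ "." ++
        (PySem.List.pyGet? moves (-1)).getD ""]
    else pvPairs 1 moves) = pvBodyB 1 moves := by
    by_cases hodd : moves.length % 2 = 1
    · rw [if_pos (by simp [hodd]), show ((moves.length / 2 : Nat) : Int) + 1 = 1 + ((moves.length / 2 : Nat) : Int) from by ring,
        ← pvPairsComplete moves 1, if_pos hodd]
    · rw [if_neg (by simp; omega), ← pvPairsComplete moves 1, if_neg hodd]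
      simp
  rw [hif]
  rw [show ("" : String) ++ pvBodyA (0 + 1) moves = pvBodyA 1 moves from by simp]
  by_cases hnil : moves = []
  · subst hnil
    rfl
  · rw [← String.toList_inj, PySem.Str.toList_strip, PySem.Str.toList_strip, PySem.Str.toList_join,
      pvBodyAB moves 1 hnil, show (" " : String).toList = [' '] from rfl]
    exact pvStripAppendSpace _
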